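-- pv_equiv track=rewrite | github.com/Currycurrycurry/FDSS_Algorithm | jzoffer/61-poker.py | isSequent
-- ===== SOURCE A (Python) =====
-- def isSequent(cards):
--     cards = sorted(cards)
--     zero_cnt = 0
--     blank_cnt = 0
--     for i in range(len(cards)-1):
--         if cards[i] == 0:
--             zero_cnt += 1
--         elif cards[i+1] > cards[i]:
--             blank_cnt += cards[i+1] - cards[i] - 1
--     return zero_cnt >= blank_cnt
-- ===== SOURCE B (Python) =====
-- def isSequent(cards):
--     zeros = cards.count(0)
--     values = set(cards) - {0}
--     if not values:
--         return True
--     blank = (max(values) - min(values)) - (len(values) - 1)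
--     return zeros >= blank
-- ===== Notes on version B (the rewrite author's own statement) =====
-- stated objective: simpler
-- what changed: Replaces sort plus adjacent-gap scan by counting zeros and taking min/max/size of the set of non-zero values (telescoped gap sum); Pre_ excludes lists containing both a zero and a negative card, where 0 is a wild card and negative values are not card values, so A's value there is an accidental artefact of zeros sorting between negatives and positives.
-- outside the precondition, e.g. on isSequent([-2, 0]): A returns False, B returns True
import Mathlib
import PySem

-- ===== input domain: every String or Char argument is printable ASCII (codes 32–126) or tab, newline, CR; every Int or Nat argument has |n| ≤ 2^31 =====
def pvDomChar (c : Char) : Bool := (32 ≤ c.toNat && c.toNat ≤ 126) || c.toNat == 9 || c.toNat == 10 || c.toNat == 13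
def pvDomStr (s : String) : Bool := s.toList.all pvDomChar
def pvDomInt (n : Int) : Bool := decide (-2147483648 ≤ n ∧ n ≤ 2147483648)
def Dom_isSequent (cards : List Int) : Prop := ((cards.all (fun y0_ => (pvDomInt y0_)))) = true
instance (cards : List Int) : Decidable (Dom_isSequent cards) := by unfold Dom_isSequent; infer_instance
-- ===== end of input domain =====

-- B replaces A's sort + adjacent-gap scan by a zero count plus min/max/size of the set of
-- non-zero values (the gap sum telescopes); objective: simpler.

-- ===== PORT A =====
def isSequent (cards : List Int) : Bool :=
  let cs := PySem.List.sorted cards (fun x => x) false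
  let st := (PySem.List.pyRange 0 ((cs.length : Int) - 1) 1).foldl
      (fun (acc : Int × Int) i =>
        if PySem.List.pyGetD cs i 0 = 0 then (acc.1 + 1, acc.2)
        else if PySem.List.pyGetD cs (i + 1) 0 > PySem.List.pyGetD cs i 0 then
          (acc.1, acc.2 + (PySem.List.pyGetD cs (i + 1) 0 - PySem.List.pyGetD cs i 0 - 1))
        else acc) (0, 0)
  decide (st.1 ≥ st.2)

-- ===== PORT B =====
def isSequent_alt (cards : List Int) : Bool :=
  let zeros : Int := PySem.List.count cards 0
  let values : PySem.Set Int := PySem.Set.diff (PySem.Set.ofList cards) (PySem.Set.ofList [0])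
  if values.isEmpty then true
  else
    let blank : Int :=
      ((PySem.List.max? values (fun x => x)).getD 0
        - (PySem.List.min? values (fun x => x)).getD 0)
      - ((values.length : Int) - 1)
    decide (zeros ≥ blank)

-- ===== PRECONDITION & SPEC =====
-- Pre_ excludes lists containing both a zero and a negative value: 0 is a wild card and
-- negative values are not card values, so no behaviour is specified there — A's value on
-- such lists is an artefact of zeros sorting between the negatives and the positives.
def Pre_isSequent (cards : List Int) : Prop :=
  ¬ ((0 : Int) ∈ cards ∧ ∃ c ∈ cards, c < 0)
instance (cards : List Int) : Decidable (Pre_isSequent cards) := by unfold Pre_isSequent; infer_instance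

def pvWitness_isSequent : List Int := [0, 3, 5]

def Spec_isSequent (cards : List Int) (out : Bool) : Prop := out = isSequent_alt cards
instance (cards : List Int) (out : Bool) : Decidable (Spec_isSequent cards out) := by unfold Spec_isSequent; infer_instance

-- ===== CLAIM (what is proved, stated in full; the proofs are below) =====
def Claim_equal_isSequent : Prop := ∀ (cards : List Int), Dom_isSequent cards → Pre_isSequent cards → Spec_isSequent cards (isSequent cards)

-- ===== LEMMAS AND PROOFS =====

def pvG2 (a b : Int) : Int := if a = 0 then 0 else if b > a then b - a - 1 else 0
def pvStep (acc : Int × Int) (p : Int × Int) : Int × Int :=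
  if p.1 = 0 then (acc.1 + 1, acc.2)
  else if p.2 > p.1 then (acc.1, acc.2 + (p.2 - p.1 - 1)) else acc
def pvG (l : List Int) : Int := ((l.zip l.tail).map (fun p => pvG2 p.1 p.2)).sum
def pvZc (l : List Int) : Int := (l.dropLast.count 0 : Int)

theorem pvStep_foldl (ps : List (Int × Int)) : ∀ z b : Int,
    ps.foldl pvStep (z, b)
      = (z + ((ps.map (fun p => if p.1 = 0 then (1:Int) else 0)).sum),
         b + ((ps.map (fun p => pvG2 p.1 p.2)).sum)) := by
  induction ps with
  | nil => simp
  | cons p t ih =>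
    intro z b
    simp only [List.foldl_cons, List.map_cons, List.sum_cons]
    rcases eq_or_ne p.1 0 with h1 | h1
    · have hs : pvStep (z, b) p = (z + 1, b) := by simp [pvStep, h1]
      rw [hs, ih]; simp [pvG2, h1, Prod.ext_iff]; omega
    · rcases lt_or_ge p.1 p.2 with h2 | h2
      · have hs : pvStep (z, b) p = (z, b + (p.2 - p.1 - 1)) := by
          simp [pvStep, h1]; omega
        rw [hs, ih]
        simp only [pvG2, if_neg h1, if_pos (show p.2 > p.1 from h2), Prod.ext_iff]
        constructor <;> [omega; skip]
        simp; omega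
      · have hs : pvStep (z, b) p = (z, b) := by simp [pvStep, h1]; omega
        rw [hs, ih]
        simp only [pvG2, if_neg h1, if_neg (show ¬ p.2 > p.1 by omega), Prod.ext_iff]
        constructor <;> simp

theorem pv_zip_tail_fst : ∀ l : List Int, (l.zip l.tail).map Prod.fst = l.dropLast
  | [] => by simp
  | [a] => by simp
  | a :: b :: t => by
    have := pv_zip_tail_fst (b :: t)
    simp only [List.tail_cons] at this ⊢
    simp only [List.zip_cons_cons, List.map_cons, List.dropLast_cons₂, this]

theorem pv_map_pairs (cs : List Int) :
    (PySem.List.pyRange 0 ((cs.length : Int) - 1) 1).map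
        (fun i => (PySem.List.pyGetD cs i 0, PySem.List.pyGetD cs (i + 1) 0))
      = cs.zip cs.tail := by
  apply List.ext_getElem
  · simp [PySem.List.length_pyRange_one, List.length_zip, List.length_tail]
  · intro i h1 h2
    have hlen : i + 1 < cs.length := by
      simp [PySem.List.length_pyRange_one] at h1; omega
    simp only [List.getElem_map, PySem.List.getElem_pyRange_one, List.getElem_zip,
      List.getElem_tail]
    have e0 : (0 : Int) + (i : Int) = ((i : Nat) : Int) := by ring
    rw [e0]
    have e1 : ((i : Nat) : Int) + 1 = (((i + 1 : Nat)) : Int) := by push_cast; ring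
    rw [e1, PySem.List.pyGetD_natCast, PySem.List.pyGetD_natCast]
    rw [List.getD_eq_getElem _ _ (by omega), List.getD_eq_getElem _ _ hlen]

def pvBodyA (cs : List Int) (acc : Int × Int) (i : Int) : Int × Int :=
  if PySem.List.pyGetD cs i 0 = 0 then (acc.1 + 1, acc.2)
  else if PySem.List.pyGetD cs (i + 1) 0 > PySem.List.pyGetD cs i 0 then
    (acc.1, acc.2 + (PySem.List.pyGetD cs (i + 1) 0 - PySem.List.pyGetD cs i 0 - 1))
  else acc

theorem portA_core (cs : List Int) :
    decide (((PySem.List.pyRange 0 ((cs.length : Int) - 1) 1).foldl (pvBodyA cs) (0, 0)).1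
      ≥ ((PySem.List.pyRange 0 ((cs.length : Int) - 1) 1).foldl (pvBodyA cs) (0, 0)).2)
      = decide (pvZc cs ≥ pvG cs) := by
  have hbody : (fun (acc : Int × Int) i =>
        if PySem.List.pyGetD cs i 0 = 0 then (acc.1 + 1, acc.2)
        else if PySem.List.pyGetD cs (i + 1) 0 > PySem.List.pyGetD cs i 0 then
          (acc.1, acc.2 + (PySem.List.pyGetD cs (i + 1) 0 - PySem.List.pyGetD cs i 0 - 1))
        else acc)
      = (fun acc i => pvStep acc (PySem.List.pyGetD cs i 0, PySem.List.pyGetD cs (i + 1) 0)) := by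
    funext acc i; simp [pvStep]
  unfold pvBodyA
  rw [hbody, ← List.foldl_map, pv_map_pairs, pvStep_foldl]
  have h1 : (((cs.zip cs.tail).map (fun p => if p.1 = 0 then (1:Int) else 0)).sum) = pvZc cs := by
    have h2 : ((cs.zip cs.tail).map (fun p => if p.1 = 0 then (1:Int) else 0))
        = (((cs.zip cs.tail).map Prod.fst).map (fun a => if decide (a = 0) = true then (1:Int) else 0)) := by
      simp [List.map_map]
    rw [h2, pv_zip_tail_fst, PySem.List.sum_map_ite_one_zero]
    unfold pvZc
    congr 1
  rw [h1]
  simp only [pvG, ge_iff_le, decide_eq_decide]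
  omega

-- sorted decomposition into negatives ++ zeros ++ positives
def pvSortL (l : List Int) : List Int := PySem.List.sorted l (fun x => x) false
def pvN (cards : List Int) : List Int := pvSortL (cards.filter (fun x => decide (x < 0)))
def pvP (cards : List Int) : List Int := pvSortL (cards.filter (fun x => decide (0 < x)))
def pvZ0 (cards : List Int) : List Int := List.replicate (cards.count 0) 0

theorem pvN_mem (cards : List Int) : ∀ x ∈ pvN cards, x < 0 := by
  intro x hx
  rw [pvN, pvSortL, PySem.List.mem_sorted] at hx
  have := List.of_mem_filter hx
  simpa using this

theorem pvP_mem (cards : List Int) : ∀ x ∈ pvP cards, 0 < x := by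
  intro x hx
  rw [pvP, pvSortL, PySem.List.mem_sorted] at hx
  have := List.of_mem_filter hx
  simpa using this

theorem pvZ0_mem (cards : List Int) : ∀ x ∈ pvZ0 cards, x = 0 := by
  intro x hx; exact List.eq_of_mem_replicate hx

theorem pv_sorted_decomp (cards : List Int) :
    pvSortL cards = pvN cards ++ pvZ0 cards ++ pvP cards := by
  apply PySem.List.sorted_id_eq_of_perm_of_pairwise
  · -- permutation
    have hzero : cards.filter (fun x => x == 0) = pvZ0 cards := List.filter_beq 0
    have hperm1 : (cards.filter (fun x => decide (x < 0))
        ++ cards.filter (fun x => !decide (x < 0))).Perm cards :=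
      List.filter_append_perm _ cards
    have hq1 : (cards.filter (fun x => !decide (x < 0))).filter (fun x => x == 0)
        = pvZ0 cards := by
      rw [List.filter_filter, ← hzero]
      apply List.filter_congr
      intro x _
      by_cases h0 : x = 0
      · simp [h0]
      · simp [h0]
    have hq2 : (cards.filter (fun x => !decide (x < 0))).filter (fun x => !(x == 0))
        = cards.filter (fun x => decide (0 < x)) := by
      rw [List.filter_filter]
      apply List.filter_congr
      intro x _
      rcases lt_trichotomy x 0 with h | h | h
      · have h0 : x ≠ 0 := by omega
        have h1 : ¬ (0 < x) := by omega
        simp [h, h1]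
      · simp [h]
      · have h0 : x ≠ 0 := by omega
        have h1 : ¬ (x < 0) := by omega
        simp [h0, h, h1]
    have hperm2 : (pvZ0 cards ++ cards.filter (fun x => decide (0 < x))).Perm
        (cards.filter (fun x => !decide (x < 0))) := by
      rw [← hq1, ← hq2]
      exact List.filter_append_perm _ _
    have step1 : (pvN cards ++ pvZ0 cards ++ pvP cards).Perm
        (cards.filter (fun x => decide (x < 0))
          ++ (pvZ0 cards ++ cards.filter (fun x => decide (0 < x)))) := by
      rw [List.append_assoc]
      exact (PySem.List.sorted_perm _ _ _).append
        ((List.Perm.refl _).append (PySem.List.sorted_perm _ _ _))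
    refine step1.trans (List.Perm.trans ?_ hperm1)
    exact (List.Perm.refl _).append hperm2
  · -- pairwise ≤
    rw [List.pairwise_append]
    refine ⟨?_, PySem.List.sorted_pairwise _ _, ?_⟩
    · rw [List.pairwise_append]
      refine ⟨PySem.List.sorted_pairwise _ _, ?_, ?_⟩
      · simp only [pvZ0]
        rw [List.pairwise_replicate]
        right; exact le_rfl
      · intro a ha b hb
        have h1 := pvN_mem cards a ha
        have h2 := pvZ0_mem cards b hb
        omega
    · intro a ha b hb
      have hb2 := pvP_mem cards b hb
      rw [List.mem_append] at ha
      rcases ha with h | h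
      · have := pvN_mem cards a h; omega
      · have := pvZ0_mem cards a h; omega

-- splitting the adjacent-pair sum over an append
theorem pv_zip_tail_append : ∀ (X : List Int), X ≠ [] → ∀ (Y : List Int), Y ≠ [] →
    (X ++ Y).zip (X ++ Y).tail
      = X.zip X.tail ++ (X.getLastD 0, Y.headD 0) :: Y.zip Y.tail
  | [], h, _, _ => absurd rfl h
  | [a], _, Y, hY => by
    cases Y with
    | nil => exact absurd rfl hY
    | cons y ys => simp
  | a :: b :: t, _, Y, hY => by
    have ih := pv_zip_tail_append (b :: t) (by simp) Y hY
    simp only [List.cons_append, List.tail_cons, List.zip_cons_cons] at ih ⊢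
    rw [ih]
    simp [List.getLastD]

theorem pvG_append (X Y : List Int) (hX : X ≠ []) (hY : Y ≠ []) :
    pvG (X ++ Y) = pvG X + pvG2 (X.getLastD 0) (Y.headD 0) + pvG Y := by
  unfold pvG
  rw [pv_zip_tail_append X hX Y hY]
  simp [List.map_append, List.sum_append]
  ring

theorem pvG_replicate (n : Nat) : pvG (List.replicate n 0) = 0 := by
  unfold pvG
  apply List.sum_eq_zero
  intro x hx
  rw [List.mem_map] at hx
  obtain ⟨p, hp, hx⟩ := hx
  have hmem : p.1 ∈ List.replicate n (0 : Int) := by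
    rcases p with ⟨p1, p2⟩
    exact (List.of_mem_zip hp).1
  have h0 : p.1 = 0 := List.eq_of_mem_replicate hmem
  rw [← hx]
  simp [pvG2, h0]

-- strict-change count and the condensed (strictly increasing) list
def pvSc : List Int → Int
  | [] => 0
  | [_] => 1
  | a :: b :: t => (if a < b then 1 else 0) + pvSc (b :: t)

def pvRsd : List Int → List Int
  | [] => []
  | [a] => [a]
  | a :: b :: t => if a < b then a :: pvRsd (b :: t) else pvRsd (b :: t)

theorem pv_getLastD_cons (a b : Int) (t : List Int) (d : Int) :
    ((a :: b :: t).getLastD d) = ((b :: t).getLastD d) := by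
  simp [List.getLastD_eq_getLast?, List.getLast?_cons_cons]

theorem pvG_tel : ∀ X : List Int, X.Pairwise (· ≤ ·) → (∀ x ∈ X, x ≠ 0) → X ≠ [] →
    pvG X = (X.getLastD 0 - X.headD 0) - (pvSc X - 1)
  | [], _, _, h => absurd rfl h
  | [a], _, _, _ => by simp [pvG, pvSc]
  | a :: b :: t, hpw, hz, _ => by
    have hab : a ≤ b := (List.pairwise_cons.mp hpw).1 b (by simp)
    have hpw' : (b :: t).Pairwise (fun x y : Int => x ≤ y) := (List.pairwise_cons.mp hpw).2
    have hz' : ∀ x ∈ b :: t, x ≠ (0:Int) := fun x hx => hz x (by simp [hx])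
    have ih := pvG_tel (b :: t) hpw' hz' (by simp)
    simp only [List.headD_cons] at ih
    have hsplit : pvG (a :: b :: t) = pvG2 a b + pvG (b :: t) := by
      unfold pvG
      simp [List.zip_cons_cons]
    have ha0 : a ≠ 0 := hz a (by simp)
    rw [hsplit, ih, pv_getLastD_cons]
    show pvG2 a b + _ = ((b :: t).getLastD 0 - a) - (((if a < b then (1:Int) else 0) + pvSc (b :: t)) - 1)
    unfold pvG2
    rcases lt_or_ge a b with h | h
    · rw [if_neg ha0, if_pos (show b > a from h), if_pos h]; ring
    · have heq : a = b := by omega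
      rw [if_neg ha0, if_neg (show ¬ b > a by omega), if_neg (show ¬ a < b by omega)]
      rw [heq]; ring

theorem pvRsd_length : ∀ X : List Int, X.Pairwise (· ≤ ·) → ((pvRsd X).length : Int) = pvSc X
  | [] , _=> rfl
  | [_], _ => rfl
  | a :: b :: t, hpw => by
    have hab : a ≤ b := (List.pairwise_cons.mp hpw).1 b (by simp)
    have ih := pvRsd_length (b :: t) (List.pairwise_cons.mp hpw).2
    show ((if a < b then a :: pvRsd (b :: t) else pvRsd (b :: t)).length : Int)
      = (if a < b then (1:Int) else 0) + pvSc (b :: t)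
    split_ifs with h
    · simp only [List.length_cons]
      push_cast
      omega
    · simpa using ih

theorem pvRsd_mem : ∀ X : List Int, X.Pairwise (· ≤ ·) → ∀ y, (y ∈ pvRsd X ↔ y ∈ X)
  | [], _, y => Iff.rfl
  | [_], _, y => Iff.rfl
  | a :: b :: t, hpw, y => by
    have hab : a ≤ b := (List.pairwise_cons.mp hpw).1 b (by simp)
    have ih := pvRsd_mem (b :: t) (List.pairwise_cons.mp hpw).2 y
    show y ∈ (if a < b then a :: pvRsd (b :: t) else pvRsd (b :: t)) ↔ _
    split_ifs with h
    · simp [ih]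
    · have heq : a = b := by omega
      rw [ih]
      simp [heq]

theorem pvRsd_pairwise : ∀ X : List Int, X.Pairwise (· ≤ ·) →
    (pvRsd X).Pairwise (· < ·)
  | [], _ => List.Pairwise.nil
  | [a], _ => by simp [pvRsd]
  | a :: b :: t, hpw => by
    have hab : a ≤ b := (List.pairwise_cons.mp hpw).1 b (by simp)
    have hpw' := (List.pairwise_cons.mp hpw).2
    have ih := pvRsd_pairwise (b :: t) hpw'
    show ((if a < b then a :: pvRsd (b :: t) else pvRsd (b :: t))).Pairwise (· < ·)
    split_ifs with h
    · refine List.pairwise_cons.mpr ⟨?_, ih⟩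
      intro y hy
      have hy' : y ∈ b :: t := (pvRsd_mem (b :: t) hpw' y).mp hy
      rcases hy' with _ | hmem
      · exact h
      · have : b ≤ y := List.rel_of_pairwise_cons hpw' (by assumption)
        omega
    · exact ih

-- head is the minimum, last the maximum, of a sorted list
theorem pv_headD_min (X : List Int) (hpw : X.Pairwise (· ≤ ·)) (hne : X ≠ []) :
    ∀ y ∈ X, X.headD 0 ≤ y := by
  cases X with
  | nil => exact absurd rfl hne
  | cons a t =>
    intro y hy
    rcases hy with _ | hmem
    · simp
    · simpa using List.rel_of_pairwise_cons hpw (by assumption)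

theorem pv_getLastD_max : ∀ X : List Int, X.Pairwise (· ≤ ·) → ∀ y ∈ X, y ≤ X.getLastD 0
  | [], _, y, hy => by simp at hy
  | [a], _, y, hy => by simp at hy; simp [hy]
  | a :: b :: t, hpw, y, hy => by
    have hab : a ≤ b := (List.pairwise_cons.mp hpw).1 b (by simp)
    have hpw' := (List.pairwise_cons.mp hpw).2
    have ih := pv_getLastD_max (b :: t) hpw'
    rw [pv_getLastD_cons]
    rcases hy with _ | hmem
    · have hb : b ≤ (b :: t).getLastD 0 := ih b (by simp)
      omega
    · exact ih y (by assumption)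

theorem pv_headD_mem (X : List Int) (hne : X ≠ []) : X.headD 0 ∈ X := by
  cases X with
  | nil => exact absurd rfl hne
  | cons a t => simp

theorem pv_getLastD_mem : ∀ X : List Int, X ≠ [] → X.getLastD 0 ∈ X
  | [], h => absurd rfl h
  | [a], _ => by simp
  | a :: b :: t, _ => by
    rw [pv_getLastD_cons]
    have := pv_getLastD_mem (b :: t) (by simp)
    simp at this ⊢
    tauto

-- bridge: a Nodup list s holding exactly the members of a sorted list X
theorem pv_set_perm_rsd (s X : List Int) (hs : s.Nodup) (hpw : X.Pairwise (· ≤ ·))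
    (hmem : ∀ y, y ∈ X ↔ y ∈ s) : s.Perm (pvRsd X) := by
  have h2 : (pvRsd X).Nodup := (pvRsd_pairwise X hpw).imp (fun h => ne_of_lt h)
  rw [List.perm_ext_iff_of_nodup hs h2]
  intro a
  rw [pvRsd_mem X hpw a, hmem]

theorem pv_set_length (s X : List Int) (hs : s.Nodup) (hpw : X.Pairwise (· ≤ ·))
    (hmem : ∀ y, y ∈ X ↔ y ∈ s) : (s.length : Int) = pvSc X := by
  rw [(pv_set_perm_rsd s X hs hpw hmem).length_eq, pvRsd_length X hpw]

theorem pv_set_min (s X : List Int) (hpw : X.Pairwise (· ≤ ·))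
    (hmem : ∀ y, y ∈ X ↔ y ∈ s) (hne : X ≠ []) :
    PySem.List.min? s (fun x => x) = some (X.headD 0) := by
  cases hm : PySem.List.min? s (fun x => x) with
  | none =>
    rw [PySem.List.min?_eq_none_iff] at hm
    have := (hmem (X.headD 0)).mp (pv_headD_mem X hne)
    rw [hm] at this
    simp at this
  | some m =>
    have hmmem : m ∈ X := (hmem m).mpr (PySem.List.min?_mem hm)
    have h1 : m ≤ X.headD 0 :=
      PySem.List.min?_isMin hm _ ((hmem _).mp (pv_headD_mem X hne))
    have h2 : X.headD 0 ≤ m := pv_headD_min X hpw hne m hmmem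
    congr 1
    omega

theorem pv_set_max (s X : List Int) (hpw : X.Pairwise (· ≤ ·))
    (hmem : ∀ y, y ∈ X ↔ y ∈ s) (hne : X ≠ []) :
    PySem.List.max? s (fun x => x) = some (X.getLastD 0) := by
  cases hm : PySem.List.max? s (fun x => x) with
  | none =>
    rw [PySem.List.max?_eq_none_iff] at hm
    have := (hmem (X.getLastD 0)).mp (pv_getLastD_mem X hne)
    rw [hm] at this
    simp at this
  | some m =>
    have hmmem : m ∈ X := (hmem m).mpr (PySem.List.max?_mem hm)
    have h1 : X.getLastD 0 ≤ m :=
      PySem.List.max?_isMax hm _ ((hmem _).mp (pv_getLastD_mem X hne))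
    have h2 : m ≤ X.getLastD 0 := pv_getLastD_max X hpw m hmmem
    congr 1
    omega

-- the sorted non-zero values, as one list
def pvNZ (cards : List Int) : List Int := pvN cards ++ pvP cards

theorem pvNZ_pairwise (cards : List Int) : (pvNZ cards).Pairwise (· ≤ ·) := by
  rw [pvNZ, List.pairwise_append]
  refine ⟨PySem.List.sorted_pairwise _ _, PySem.List.sorted_pairwise _ _, ?_⟩
  intro a ha b hb
  have := pvN_mem cards a ha
  have := pvP_mem cards b hb
  omega

theorem pvNZ_mem (cards : List Int) : ∀ y, y ∈ pvNZ cards ↔ y ∈ cards ∧ y ≠ 0 := by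
  intro y
  rw [pvNZ, List.mem_append, pvN, pvP, pvSortL, pvSortL,
    PySem.List.mem_sorted, PySem.List.mem_sorted, List.mem_filter, List.mem_filter]
  constructor
  · rintro (⟨h1, h2⟩ | ⟨h1, h2⟩) <;> simp at h2 <;> exact ⟨h1, by omega⟩
  · rintro ⟨h1, h2⟩
    rcases lt_trichotomy y 0 with h | h | h
    · left; exact ⟨h1, by simpa using h⟩
    · exact absurd h h2
    · right; exact ⟨h1, by simpa using h⟩

theorem pvNZ_nonzero (cards : List Int) : ∀ x ∈ pvNZ cards, x ≠ 0 := by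
  intro x hx
  exact ((pvNZ_mem cards x).mp hx).2

-- the B-side set of non-zero values
theorem pv_values_mem (cards : List Int) : ∀ y,
    y ∈ PySem.Set.diff (PySem.Set.ofList cards) (PySem.Set.ofList [0]) ↔ y ∈ pvNZ cards := by
  intro y
  rw [PySem.Set.mem_diff, PySem.Set.mem_ofList, PySem.Set.mem_ofList, pvNZ_mem]
  simp

theorem pv_values_nodup (cards : List Int) :
    (PySem.Set.diff (PySem.Set.ofList cards) (PySem.Set.ofList [0])).Nodup :=
  PySem.Set.nodup_diff _ _ (PySem.Set.nodup_ofList cards)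

theorem pv_values_isEmpty (cards : List Int) :
    (PySem.Set.diff (PySem.Set.ofList cards) (PySem.Set.ofList [0])).isEmpty = true
      ↔ pvNZ cards = [] := by
  rw [List.isEmpty_iff, List.eq_nil_iff_forall_not_mem, List.eq_nil_iff_forall_not_mem]
  constructor
  · intro h y hy
    exact h y ((pv_values_mem cards y).mpr hy)
  · intro h y hy
    exact h y ((pv_values_mem cards y).mp hy)

-- the main computation: under Pre_, A's sorted-scan value equals B's closed form
theorem pv_main (cards : List Int) (hpre : Pre_isSequent cards) :
    (decide (pvZc (pvSortL cards) ≥ pvG (pvSortL cards))) = isSequent_alt cards := by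
  have hXpw := pvNZ_pairwise cards
  have hXmem : ∀ y, y ∈ pvNZ cards ↔ y ∈ (PySem.Set.diff (PySem.Set.ofList cards) (PySem.Set.ofList [0])) :=
    fun y => ((pv_values_mem cards y).symm)
  simp only [isSequent_alt]
  rw [PySem.List.count_eq]
  by_cases hX : pvNZ cards = []
  case pos =>
    -- all cards are zero: both sides are true
    have hEmp : (PySem.Set.diff (PySem.Set.ofList cards) (PySem.Set.ofList [0])).isEmpty = true :=
      (pv_values_isEmpty cards).mpr hX
    rw [if_pos hEmp]
    have hN : pvN cards = [] := by
      have := List.append_eq_nil_iff.mp hX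
      exact this.1
    have hP : pvP cards = [] := (List.append_eq_nil_iff.mp hX).2
    rw [pv_sorted_decomp cards, hN, hP]
    simp only [List.nil_append, List.append_nil]
    have hg : pvG (pvZ0 cards) = 0 := by unfold pvZ0; exact pvG_replicate _
    rw [hg]
    have : 0 ≤ pvZc (pvZ0 cards) := by
      unfold pvZc; positivity
    simpa using this
  case neg =>
    have hEmp : (PySem.Set.diff (PySem.Set.ofList cards) (PySem.Set.ofList [0])).isEmpty = false := by
      rw [← Bool.not_eq_true, pv_values_isEmpty cards]
      exact hX
    rw [if_neg (by simp [hEmp])]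
    have hmin := pv_set_min _ (pvNZ cards) hXpw hXmem hX
    have hmax := pv_set_max _ (pvNZ cards) hXpw hXmem hX
    have hlen := pv_set_length _ (pvNZ cards) (pv_values_nodup cards) hXpw hXmem
    have htel := pvG_tel (pvNZ cards) hXpw (pvNZ_nonzero cards) hX
    rw [hmin, hmax, hlen]
    simp only [Option.getD_some]
    -- Pre_ splits: either no zeros at all, or no negatives
    unfold Pre_isSequent at hpre
    rw [not_and, not_exists] at hpre
    by_cases hz : (0 : Int) ∈ cards
    case neg =>
      -- no zeros: sorted cards = pvNZ cards, zero count is 0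
      have hcz : cards.count 0 = 0 := List.count_eq_zero.mpr hz
      have hZ0 : pvZ0 cards = [] := by simp [pvZ0, hcz]
      have hs : pvSortL cards = pvNZ cards := by
        rw [pv_sorted_decomp cards, hZ0, pvNZ]
        simp
      rw [hs, htel]
      have hzc : pvZc (pvNZ cards) = 0 := by
        unfold pvZc
        rw [List.count_eq_zero.mpr]
        · simp
        · intro hmem
          exact (pvNZ_nonzero cards 0 ((List.dropLast_sublist _).subset hmem)) rfl
      rw [hzc, hcz]
      simp only [Nat.cast_zero, ge_iff_le]
    case pos =>
      -- zeros present, so by Pre_ no negatives: sorted cards = zeros ++ positives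
      have hnoneg : ∀ c ∈ cards, 0 ≤ c := by
        intro c hc
        have := hpre hz c
        rw [not_and, not_lt] at this
        exact this hc
      have hN : pvN cards = [] := by
        rw [pvN, pvSortL, PySem.List.sorted_eq_nil_iff, List.filter_eq_nil_iff]
        intro c hc
        have := hnoneg c hc
        simp only [decide_eq_true_eq]
        omega
      have hXP : pvNZ cards = pvP cards := by rw [pvNZ, hN]; simp
      have hcz : cards.count 0 ≠ 0 := by
        rw [Ne, List.count_eq_zero]
        simpa using hz
      have hZ0ne : pvZ0 cards ≠ [] := by
        simp only [pvZ0, Ne, List.replicate_eq_nil_iff]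
        omega
      have hPne : pvP cards ≠ [] := by rw [← hXP]; exact hX
      have hs : pvSortL cards = pvZ0 cards ++ pvP cards := by
        rw [pv_sorted_decomp cards, hN]
        simp
      have hheadZ : (pvZ0 cards).headD 0 = 0 := by
        cases hval : cards.count 0 with
        | zero => exact absurd hval hcz
        | succ k => simp [pvZ0, hval, List.replicate_succ]
      have hlastZ : (pvZ0 cards).getLastD 0 = 0 :=
        List.eq_of_mem_replicate (pv_getLastD_mem _ hZ0ne)
      have hgZ0 : pvG (pvZ0 cards) = 0 := by unfold pvZ0; exact pvG_replicate _
      have hg : pvG (pvZ0 cards ++ pvP cards) = pvG (pvP cards) := by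
        rw [pvG_append _ _ hZ0ne hPne, hgZ0, hlastZ]
        have e2 : pvG2 0 ((pvP cards).headD 0) = 0 := by
          unfold pvG2; rw [if_pos rfl]
        rw [e2]; ring
      have hzc : pvZc (pvZ0 cards ++ pvP cards) = (cards.count 0 : Int) := by
        unfold pvZc
        rw [List.dropLast_append_of_ne_nil hPne, List.count_append]
        have hcP : ((pvP cards).dropLast).count 0 = 0 :=
          List.count_eq_zero.mpr (fun h =>
            absurd (pvP_mem cards 0 ((List.dropLast_sublist _).subset h)) (lt_irrefl 0))
        rw [hcP]
        simp [pvZ0]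
      rw [hs, hg, hzc, ← hXP, htel]
      simp only [ge_iff_le]

-- ===== VERDICT (by name: the statement is the Claim_ definition above) =====
theorem isSequent_spec : Claim_equal_isSequent := by
  intro cards _ hpre
  unfold Spec_isSequent
  have hA : isSequent cards
      = decide (pvZc (pvSortL cards) ≥ pvG (pvSortL cards)) := portA_core (pvSortL cards)
  rw [hA, pv_main cards hpre]
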